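-- pv_equiv track=rewrite | github.com/Jackychenji/SWS3023_WebMining_G6_2024 | OnlyTag.py | create_binary_list
-- ===== SOURCE A (Python) =====
-- def create_binary_list(prefer_genre):
--     prefer_genre = [genre.lower() for genre in prefer_genre]
--     binary_list = [0] * 19  # Initialize a list of 19 zeros
--
--     # Define the genres list
--     genres = ['electronic', 'rock', 'hip-hop', 'indie', 'jazz', 'reggae', 'british', 'punk', '80s', 'dance',
--               'acoustic', 'rnb', 'hardcore', 'country', 'blues', 'alternative', 'classical', 'rap', 'metal']
--
--     # Check each genre tag against the `prefer_genre` list and set the corresponding index to 1 if present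
--     for index, genre in enumerate(genres):
--         if genre in prefer_genre:
--             binary_list[index] = 1
--
--     return binary_list
-- ===== SOURCE B (Python) =====
-- def create_binary_list(prefer_genre):
--     genres = ['electronic', 'rock', 'hip-hop', 'indie', 'jazz', 'reggae', 'british', 'punk', '80s', 'dance',
--               'acoustic', 'rnb', 'hardcore', 'country', 'blues', 'alternative', 'classical', 'rap', 'metal']
--     genre_to_index = {g: i for i, g in enumerate(genres)}
--     binary_list = [0] * 19
--     for g in [genre.lower() for genre in prefer_genre]:
--         i = genre_to_index.get(g)
--         if i is not None:
--             binary_list[i] = 1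
--     return binary_list
-- ===== Notes on version B (the rewrite author's own statement) =====
-- stated objective: idiomatic
-- what changed: The loop now iterates once over prefer_genre (lowercased once) and marks indices through a precomputed genre->index dict, instead of scanning prefer_genre for each of the 19 fixed genres.
import Mathlib
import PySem

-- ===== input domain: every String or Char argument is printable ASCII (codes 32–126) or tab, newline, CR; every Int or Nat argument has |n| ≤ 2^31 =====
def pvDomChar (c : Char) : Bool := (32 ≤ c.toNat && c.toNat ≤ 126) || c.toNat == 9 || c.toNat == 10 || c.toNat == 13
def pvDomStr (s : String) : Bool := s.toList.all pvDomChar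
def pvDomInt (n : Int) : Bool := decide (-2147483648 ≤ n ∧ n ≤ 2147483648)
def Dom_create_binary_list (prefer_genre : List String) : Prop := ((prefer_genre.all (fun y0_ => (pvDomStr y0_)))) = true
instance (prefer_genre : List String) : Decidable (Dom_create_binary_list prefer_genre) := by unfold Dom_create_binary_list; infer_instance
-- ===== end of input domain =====

-- B builds the same 19-bit presence vector by one pass over prefer_genre (lowercased once) with a
-- precomputed genre→index dictionary, instead of A's scan of prefer_genre for each of the 19 genres (idiomatic).

-- ===== PORT A =====
-- the fixed genre list both Pythons write out literally
def pvGenres : List String :=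
  ["electronic", "rock", "hip-hop", "indie", "jazz", "reggae", "british", "punk", "80s", "dance",
   "acoustic", "rnb", "hardcore", "country", "blues", "alternative", "classical", "rap", "metal"]

-- loop body of A: 'if genre in prefer_genre: binary_list[index] = 1'
def pvStepA (pg : List String) (bl : List Int) (p : Int × String) : List Int :=
  if pg.contains p.2 then PySem.List.pySetD bl p.1 1 else bl

def create_binary_list (prefer_genre : List String) : List Int :=
  (PySem.List.enumerate pvGenres 0).foldl
    (pvStepA (prefer_genre.map PySem.Str.lower)) (List.replicate 19 (0 : Int))

-- ===== PORT B =====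
-- genre_to_index = {g: i for i, g in enumerate(genres)}
def pvTable : PySem.Dict String Int :=
  (PySem.List.enumerate pvGenres 0).foldl (fun d p => d.insert p.2 p.1) PySem.Dict.empty

-- loop body of B: 'i = genre_to_index.get(g); if i is not None: binary_list[i] = 1'
def pvStepB (bl : List Int) (g : String) : List Int :=
  match pvTable.get? g with
  | some i => PySem.List.pySetD bl i 1
  | none => bl

def create_binary_list_alt (prefer_genre : List String) : List Int :=
  (prefer_genre.map PySem.Str.lower).foldl pvStepB (List.replicate 19 (0 : Int))

-- ===== PRECONDITION & SPEC =====
def Spec_create_binary_list (prefer_genre : List String) (out : List Int) : Prop := out = create_binary_list_alt prefer_genre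
instance (prefer_genre : List String) (out : List Int) : Decidable (Spec_create_binary_list prefer_genre out) := by unfold Spec_create_binary_list; infer_instance

-- ===== CLAIM (what is proved, stated in full; the proofs are below) =====
def Claim_equal_create_binary_list : Prop := ∀ (prefer_genre : List String), Dom_create_binary_list prefer_genre → Spec_create_binary_list prefer_genre (create_binary_list prefer_genre)

-- ===== LEMMAS AND PROOFS =====

lemma pvGenres_length : pvGenres.length = 19 := by decide

lemma pvGenres_nodup : pvGenres.Nodup := by decide

-- the dict built by the comprehension, looked up: position of the key in pvGenres
lemma pvGet_fold (gs : List String) (hnd : gs.Nodup) (s : Nat) (d : PySem.Dict String Int)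
    (x : String) :
    ((PySem.List.enumerate gs (s : Int)).foldl (fun d p => d.insert p.2 p.1) d).get? x =
      match gs.idxOf? x with
      | some k => some ((s + k : Nat) : Int)
      | none => d.get? x := by
  induction gs generalizing s d with
  | nil => simp [PySem.List.enumerate, List.idxOf?_nil]
  | cons g gs ih =>
      rw [PySem.List.enumerate_cons, List.foldl_cons]
      have hcast : ((s : Int) + 1) = ((s + 1 : Nat) : Int) := by push_cast; ring
      rw [hcast, ih (List.Nodup.of_cons hnd) (s + 1) _, List.idxOf?_cons]
      by_cases hgx : (g == x) = true
      · rw [if_pos hgx]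
        have hg : g = x := by simpa using hgx
        subst hg
        have hnmem : g ∉ gs := (List.nodup_cons.mp hnd).1
        rw [List.idxOf?_eq_none_iff.mpr hnmem]
        simp [PySem.Dict.get?_insert_self]
      · rw [if_neg hgx]
        have hne : x ≠ g := fun he => hgx (by simp [he])
        cases hk : gs.idxOf? x with
        | none => exact PySem.Dict.get?_insert_of_ne d _ hne
        | some k =>
            simp only [Option.map_some]
            exact congrArg some (by push_cast; ring)

-- a successful lookup returns the index of its key in pvGenres
lemma pvLookup_some {x : String} {i : Int} (h : pvTable.get? x = some i) :
    0 ≤ i ∧ i.toNat < 19 ∧ pvGenres[i.toNat]? = some x := by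
  unfold pvTable at h
  have hf := pvGet_fold pvGenres pvGenres_nodup 0 PySem.Dict.empty x
  rw [Nat.cast_zero] at hf
  rw [hf] at h
  cases hk : pvGenres.idxOf? x with
  | none => rw [hk, PySem.Dict.get?_empty] at h; cases h
  | some k =>
      rw [hk] at h
      obtain ⟨hlt, hget, -⟩ := List.idxOf?_eq_some_iff.mp hk
      have hik : ((0 + k : Nat) : Int) = i := (Option.some.injEq _ _).mp h
      have hik' : i = (k : Int) := by omega
      subst hik'
      refine ⟨by omega, ?_, ?_⟩
      · rw [Int.toNat_natCast]
        rw [pvGenres_length] at hlt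
        exact hlt
      · rw [Int.toNat_natCast, List.getElem?_eq_getElem hlt, hget]

-- every genre is found at its own index
lemma pvLookup_genre {j : Nat} (hj : j < 19) {g : String} (hg : pvGenres[j]? = some g) :
    pvTable.get? g = some (j : Int) := by
  unfold pvTable
  have hf := pvGet_fold pvGenres pvGenres_nodup 0 PySem.Dict.empty g
  rw [Nat.cast_zero] at hf
  rw [hf]
  have hlen : j < pvGenres.length := by rw [pvGenres_length]; exact hj
  have hget : pvGenres[j] = g := by
    rw [List.getElem?_eq_getElem hlen] at hg
    exact (Option.some.injEq _ _).mp hg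
  have hidx : pvGenres.idxOf? g = some j := by
    rw [List.idxOf?_eq_some_iff]
    refine ⟨hlen, hget, ?_⟩
    intro k hk hkg
    have hkj : k = j := by
      have := (List.Nodup.getElem_inj_iff pvGenres_nodup (i := k) (j := j)
        (hi := by omega) (hj := hlen)).mp (by rw [hget]; exact hkg)
      exact this
    omega
  rw [hidx]
  exact congrArg some (by push_cast; ring)

-- the A-side fold preserves the length
lemma pvFoldA_length (pg : List String) (ps : List (Int × String)) (acc : List Int) :
    (ps.foldl (pvStepA pg) acc).length = acc.length := by
  induction ps generalizing acc with
  | nil => rfl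
  | cons p ps ih =>
      rw [List.foldl_cons, ih]
      simp only [pvStepA]
      split <;> simp [PySem.List.length_pySetD]

-- the B-side fold preserves the length
lemma pvFoldB_length (xs : List String) (acc : List Int) :
    (xs.foldl pvStepB acc).length = acc.length := by
  induction xs generalizing acc with
  | nil => rfl
  | cons x xs ih =>
      rw [List.foldl_cons, ih]
      simp only [pvStepB]
      split <;> simp [PySem.List.length_pySetD]

-- entry j of A's fold over 'enumerate gs s': 1 iff the genre at offset j - s is preferred
lemma pvFoldA_getElem? (pg : List String) (gs : List String) (s : Nat) (acc : List Int)
    (j : Nat) (hj : j < acc.length) :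
    ((PySem.List.enumerate gs (s : Int)).foldl (pvStepA pg) acc)[j]? =
      if s ≤ j ∧ (gs[j - s]?.any pg.contains) then some 1 else acc[j]? := by
  induction gs generalizing s acc with
  | nil => simp [PySem.List.enumerate]
  | cons g gs ih =>
      rw [PySem.List.enumerate_cons, List.foldl_cons]
      have hcast : ((s : Int) + 1) = ((s + 1 : Nat) : Int) := by push_cast; ring
      rw [hcast]
      have hlen : (pvStepA pg acc ((s : Int), g)).length = acc.length := by
        simp only [pvStepA]; split <;> simp
      rw [ih (s + 1) _ (hlen ▸ hj)]
      simp only [pvStepA]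
      by_cases hc : pg.contains g = true
      · rw [if_pos hc, PySem.List.pySetD_of_nonneg acc 1 (Int.natCast_nonneg s),
          Int.toNat_natCast]
        by_cases hrest : s + 1 ≤ j ∧ (gs[j - (s + 1)]?.any pg.contains) = true
        · have hdx : j - s = (j - (s + 1)) + 1 := by omega
          rw [if_pos hrest,
            if_pos ⟨by omega, by rw [hdx, List.getElem?_cons_succ]; exact hrest.2⟩]
        · rw [if_neg hrest, List.getElem?_set]
          by_cases hsj : s = j
          · subst hsj
            rw [if_pos rfl, if_pos hj,
              if_pos ⟨le_rfl, by rw [Nat.sub_self, List.getElem?_cons_zero]; simpa using hc⟩]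
          · rw [if_neg hsj, if_neg]
            rintro ⟨h1, h2⟩
            have hdx : j - s = (j - (s + 1)) + 1 := by omega
            rw [hdx, List.getElem?_cons_succ] at h2
            exact hrest ⟨by omega, h2⟩
      · rw [if_neg hc]
        by_cases hR : s ≤ j ∧ ((g :: gs)[j - s]?.any pg.contains) = true
        · obtain ⟨h1, h2⟩ := hR
          by_cases hsj : s = j
          · subst hsj
            rw [Nat.sub_self, List.getElem?_cons_zero, Option.any_some] at h2
            exact absurd h2 hc
          · have hdx : j - s = (j - (s + 1)) + 1 := by omega
            rw [hdx, List.getElem?_cons_succ] at h2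
            rw [if_pos ⟨by omega, h2⟩, if_pos ⟨h1, by rw [hdx, List.getElem?_cons_succ]; exact h2⟩]
        · rw [if_neg hR, if_neg]
          rintro ⟨k1, k2⟩
          have hdx : j - s = (j - (s + 1)) + 1 := by omega
          exact hR ⟨by omega, by rw [hdx, List.getElem?_cons_succ]; exact k2⟩

-- entry j of B's fold: 1 iff genre j occurs among the processed preferences
lemma pvFoldB_getElem? (xs : List String) (acc : List Int) (hlen : acc.length = 19)
    (j : Nat) (hj : j < 19) :
    (xs.foldl pvStepB acc)[j]? =
      if (pvGenres[j]?.any xs.contains) then some 1 else acc[j]? := by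
  have hg : pvGenres[j]? = some pvGenres[j] :=
    List.getElem?_eq_getElem (by rw [pvGenres_length]; exact hj)
  induction xs generalizing acc with
  | nil =>
      rw [List.foldl_nil, if_neg]
      rw [hg, Option.any_some]
      simp
  | cons x xs ih =>
      rw [List.foldl_cons]
      cases h : pvTable.get? x with
      | none =>
          have hstep : pvStepB acc x = acc := by simp [pvStepB, h]
          rw [hstep, ih acc hlen, hg, Option.any_some, Option.any_some]
          have hxg : (pvGenres[j] == x) = false := by
            rw [beq_eq_false_iff_ne]
            intro hx
            have hgen := pvLookup_genre hj hg
            rw [hx] at hgen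
            rw [hgen] at h
            cases h
          rw [List.contains_cons, hxg, Bool.false_or]
      | some i =>
          have hstep : pvStepB acc x = PySem.List.pySetD acc i 1 := by simp [pvStepB, h]
          obtain ⟨hi0, hi19, hig⟩ := pvLookup_some h
          rw [hstep, ih _ (by rw [PySem.List.length_pySetD]; exact hlen),
            PySem.List.pySetD_of_nonneg acc 1 hi0, hg, Option.any_some, Option.any_some]
          by_cases hrest : xs.contains pvGenres[j] = true
          · rw [if_pos hrest, if_pos (by rw [List.contains_cons, hrest, Bool.or_true])]
          · rw [if_neg hrest, List.getElem?_set]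
            by_cases hij : i.toNat = j
            · have hx : pvGenres[j] = x := by
                rw [hij, hg] at hig
                exact (Option.some.injEq _ _).mp hig
              rw [if_pos hij, if_pos (by rw [hij, hlen]; exact hj),
                if_pos (by rw [List.contains_cons, hx, beq_self_eq_true, Bool.true_or])]
            · rw [if_neg hij, if_neg]
              rw [List.contains_cons, Bool.or_eq_true, beq_iff_eq]
              rintro (hx | hx)
              · -- x is genre j, but the lookup said index i ≠ j
                have hgen := pvLookup_genre hj hg
                rw [hx, h, Option.some.injEq] at hgen
                exact hij (by rw [hgen, Int.toNat_natCast])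
              · exact hrest hx

-- ===== VERDICT (by name: the statement is the Claim_ definition above) =====
theorem create_binary_list_spec : Claim_equal_create_binary_list := by
  intro pg _
  unfold Spec_create_binary_list create_binary_list create_binary_list_alt
  apply List.ext_getElem?
  intro j
  by_cases hj : j < 19
  · rw [pvFoldB_getElem? (pg.map PySem.Str.lower) _ (by simp) j hj]
    have hA := pvFoldA_getElem? (pg.map PySem.Str.lower) pvGenres 0
      (List.replicate 19 (0 : Int)) j (by simpa using hj)
    rw [Nat.cast_zero] at hA
    rw [hA]
    simp
  · have l1 := pvFoldA_length (pg.map PySem.Str.lower)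
      (PySem.List.enumerate pvGenres 0) (List.replicate 19 (0 : Int))
    have l2 := pvFoldB_length (pg.map PySem.Str.lower) (List.replicate 19 (0 : Int))
    rw [List.getElem?_eq_none, List.getElem?_eq_none]
    · rw [l2]; simp; omega
    · rw [l1]; simp; omega
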